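-- pv_equiv track=rewrite | github.com/mikewarot/Bitgrid_python | bitgrid/router.py | route_luts
-- ===== SOURCE A (Python) =====
-- from typing import Dict, List, Tuple, Optional
--
-- def route_luts(out_dir: str, in_pin: str) -> List[int]:
--     # Build 4 LUTs (16-bit) such that output 'out_dir' equals the chosen 'in_pin' input.
--     # Inputs order: N,E,S,W; idx = N | (E<<1) | (S<<2) | (W<<3)
--     lutN = lutE = lutS = lutW = 0
--     out_map = {'N': 'lutN', 'E': 'lutE', 'S': 'lutS', 'W': 'lutW'}
--     for idx in range(16):
--         n = (idx >> 0) & 1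
--         e = (idx >> 1) & 1
--         s = (idx >> 2) & 1
--         w = (idx >> 3) & 1
--         val = {'N': n, 'E': e, 'S': s, 'W': w}[in_pin]
--         if out_dir == 'N':
--             lutN |= (val << idx)
--         elif out_dir == 'E':
--             lutE |= (val << idx)
--         elif out_dir == 'S':
--             lutS |= (val << idx)
--         elif out_dir == 'W':
--             lutW |= (val << idx)
--     return [lutN, lutE, lutS, lutW]
-- ===== SOURCE B (Python) =====
-- def route_luts(out_dir: str, in_pin: str):
--     # Closed form: each input pin's truth column over idx=0..15 is a fixed 16-bit mask.
--     mask = {'N': 0xAAAA, 'E': 0xCCCC, 'S': 0xF0F0, 'W': 0xFF00}[in_pin]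
--     result = [0, 0, 0, 0]
--     pos = {'N': 0, 'E': 1, 'S': 2, 'W': 3}
--     if out_dir in pos:
--         result[pos[out_dir]] = mask
--     return result
-- ===== Notes on version B (the rewrite author's own statement) =====
-- stated objective: simpler
-- what changed: Replaces the 16-iteration bit-assembly loop with a closed-form per-pin 16-bit mask table and a single positional assignment.
import Mathlib
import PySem

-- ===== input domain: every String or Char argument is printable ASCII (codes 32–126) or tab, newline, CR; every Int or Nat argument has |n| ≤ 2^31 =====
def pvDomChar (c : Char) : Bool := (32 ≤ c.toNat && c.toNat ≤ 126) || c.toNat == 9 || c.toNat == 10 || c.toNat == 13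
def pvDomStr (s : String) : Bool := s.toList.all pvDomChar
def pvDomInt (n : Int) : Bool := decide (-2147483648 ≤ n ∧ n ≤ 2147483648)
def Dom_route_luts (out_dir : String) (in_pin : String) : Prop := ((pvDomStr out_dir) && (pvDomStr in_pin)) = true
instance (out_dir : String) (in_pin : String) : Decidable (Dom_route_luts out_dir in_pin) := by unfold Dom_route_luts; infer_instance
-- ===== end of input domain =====

-- B replaces A's 16-iteration LUT-assembly loop with a closed-form per-pin mask table
-- and a single positional assignment (objective: simpler).

-- ===== PORT A =====
-- The {'N':n,...}[in_pin] lookup raises KeyError on an unknown in_pin; its port returns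
-- none there, read with .getD 0 — exactly those inputs are excluded by Pre_route_luts.
def route_luts (out_dir : String) (in_pin : String) : List Int :=
  let st := (PySem.List.pyRange 0 16 1).foldl (fun st idx =>
    let (lutN, lutE, lutS, lutW) := st
    let n : Int := PySem.Int.band (idx >>> (0 : Nat)) 1
    let e : Int := PySem.Int.band (idx >>> (1 : Nat)) 1
    let s : Int := PySem.Int.band (idx >>> (2 : Nat)) 1
    let w : Int := PySem.Int.band (idx >>> (3 : Nat)) 1
    let val : Int :=
      (PySem.Dict.get? (PySem.Dict.ofList [("N", n), ("E", e), ("S", s), ("W", w)]) in_pin).getD 0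
    if out_dir == "N" then (PySem.Int.bor lutN (val <<< idx.toNat), lutE, lutS, lutW)
    else if out_dir == "E" then (lutN, PySem.Int.bor lutE (val <<< idx.toNat), lutS, lutW)
    else if out_dir == "S" then (lutN, lutE, PySem.Int.bor lutS (val <<< idx.toNat), lutW)
    else if out_dir == "W" then (lutN, lutE, lutS, PySem.Int.bor lutW (val <<< idx.toNat))
    else (lutN, lutE, lutS, lutW)) ((0 : Int), (0 : Int), (0 : Int), (0 : Int))
  [st.1, st.2.1, st.2.2.1, st.2.2.2]

-- ===== PORT B =====
-- mask = {'N':0xAAAA,...}[in_pin] raises KeyError on unknown in_pin, like A (outside Pre_).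
def route_luts_alt (out_dir : String) (in_pin : String) : List Int :=
  let mask : Int :=
    (PySem.Dict.get? (PySem.Dict.ofList
      [("N", (0xAAAA : Int)), ("E", 0xCCCC), ("S", 0xF0F0), ("W", 0xFF00)]) in_pin).getD 0
  let pos := PySem.Dict.ofList [("N", (0 : Int)), ("E", 1), ("S", 2), ("W", 3)]
  if pos.contains out_dir then
    ([0, 0, 0, 0] : List Int).set (pos.getD out_dir 0).toNat mask
  else [0, 0, 0, 0]

-- ===== PRECONDITION & SPEC =====
-- Pre_ excludes exactly the inputs where A raises KeyError (in_pin not one of N/E/S/W);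
-- B raises there too.
def Pre_route_luts (out_dir : String) (in_pin : String) : Prop :=
  in_pin = "N" ∨ in_pin = "E" ∨ in_pin = "S" ∨ in_pin = "W"
instance (out_dir : String) (in_pin : String) : Decidable (Pre_route_luts out_dir in_pin) := by
  unfold Pre_route_luts; infer_instance
def pvWitness_route_luts : String × String := ("E", "W")

def Spec_route_luts (out_dir : String) (in_pin : String) (out : List Int) : Prop := out = route_luts_alt out_dir in_pin
instance (out_dir : String) (in_pin : String) (out : List Int) : Decidable (Spec_route_luts out_dir in_pin out) := by unfold Spec_route_luts; infer_instance

-- ===== CLAIM (what is proved, stated in full; the proofs are below) =====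
def Claim_equal_route_luts : Prop := ∀ (out_dir : String) (in_pin : String), Dom_route_luts out_dir in_pin → Pre_route_luts out_dir in_pin → Spec_route_luts out_dir in_pin (route_luts out_dir in_pin)

-- ===== LEMMAS AND PROOFS =====
-- When out_dir is none of the four directions, every branch of A's loop body falls
-- through and B's membership test fails: both programs yield [0, 0, 0, 0].
theorem route_luts_miss (out_dir : String) (in_pin : String)
    (h1 : out_dir ≠ "N") (h2 : out_dir ≠ "E") (h3 : out_dir ≠ "S") (h4 : out_dir ≠ "W") :
    route_luts out_dir in_pin = [0, 0, 0, 0] := by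
  simp [route_luts, PySem.List.pyRange, h1, h2, h3, h4]

theorem route_luts_alt_miss (out_dir : String) (in_pin : String)
    (h1 : out_dir ≠ "N") (h2 : out_dir ≠ "E") (h3 : out_dir ≠ "S") (h4 : out_dir ≠ "W") :
    route_luts_alt out_dir in_pin = [0, 0, 0, 0] := by
  have hd : PySem.Dict.ofList [("N", (0 : Int)), ("E", 1), ("S", 2), ("W", 3)]
      = PySem.Dict.mk [("N", (0 : Int)), ("E", 1), ("S", 2), ("W", 3)] := by decide
  simp [route_luts_alt, hd, PySem.Dict.contains_mk, Ne.symm h1, Ne.symm h2, Ne.symm h3,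
    Ne.symm h4]

theorem route_luts_eq_alt (out_dir : String) (in_pin : String)
    (h : Pre_route_luts out_dir in_pin) :
    route_luts out_dir in_pin = route_luts_alt out_dir in_pin := by
  by_cases h1 : out_dir = "N"
  · subst h1; rcases h with h | h | h | h <;> subst h <;> decide
  by_cases h2 : out_dir = "E"
  · subst h2; rcases h with h | h | h | h <;> subst h <;> decide
  by_cases h3 : out_dir = "S"
  · subst h3; rcases h with h | h | h | h <;> subst h <;> decide
  by_cases h4 : out_dir = "W"
  · subst h4; rcases h with h | h | h | h <;> subst h <;> decide
  · rw [route_luts_miss out_dir in_pin h1 h2 h3 h4,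
      route_luts_alt_miss out_dir in_pin h1 h2 h3 h4]

-- ===== VERDICT (by name: the statement is the Claim_ definition above) =====
theorem route_luts_spec : Claim_equal_route_luts := by
  intro out_dir in_pin _ hpre
  exact route_luts_eq_alt out_dir in_pin hpre
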